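-- pv_equiv track=rewrite | github.com/camel-master/algorithm_study | Programmers/신고_결과_받기/main.py | solution
-- ===== SOURCE A (Python) =====
-- def solution(id_list, report, k):
--     answer = []
--     reported_users = dict() # 신고당한 횟수
--     users = dict()  # 신고한 유저들을 집합구조로 저장.
--     for id in id_list:
--         reported_users[id] = set()
--         users[id] = set()
--
--     for r in report:
--         uid, reported_id = r.split()
--         reported_users[reported_id].add(uid)
--         users[uid].add(reported_id)
--
--     for repo_info in users.items():
--         cnt = 0
--         for repo_id in repo_info[1]:
--
--             if len(reported_users[repo_id]) >= k:
--                 cnt += 1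
--         answer.append(cnt)
--
--     return answer
-- ===== SOURCE B (Python) =====
-- def solution(id_list, report, k):
--     # gather: distinct reporters per reported target, in one pass over report
--     reporters_of = {}
--     for r in report:
--         uid, target = r.split()
--         reporters_of.setdefault(target, set()).add(uid)
--     # scatter: +1 to every reporter of each banned target
--     count = {uid: 0 for uid in id_list}
--     for reporters in reporters_of.values():
--         if len(reporters) >= k:
--             for uid in reporters:
--                 count[uid] += 1
--     return list(count.values())
-- ===== Notes on version B (the rewrite author's own statement) =====
-- stated objective: alternative
-- what changed: A builds per-user target sets and, for each user, re-tests every reported target against the ban threshold; B inverts the decomposition: one gather pass builds reporters-per-target, a scatter pass adds 1 to each reporter of every banned target, and the answer is the values of a count dict keyed by the ids.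
import Mathlib
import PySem

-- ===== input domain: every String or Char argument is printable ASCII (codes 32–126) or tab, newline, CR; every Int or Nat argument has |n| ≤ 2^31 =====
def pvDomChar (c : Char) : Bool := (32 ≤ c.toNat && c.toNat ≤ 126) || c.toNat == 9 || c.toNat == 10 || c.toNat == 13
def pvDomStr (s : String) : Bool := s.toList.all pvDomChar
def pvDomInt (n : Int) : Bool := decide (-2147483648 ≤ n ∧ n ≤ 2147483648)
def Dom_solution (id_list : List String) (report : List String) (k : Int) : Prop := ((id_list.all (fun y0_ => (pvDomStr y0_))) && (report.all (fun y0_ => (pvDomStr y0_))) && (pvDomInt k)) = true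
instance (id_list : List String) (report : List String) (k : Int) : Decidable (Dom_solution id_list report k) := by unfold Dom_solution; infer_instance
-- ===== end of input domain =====

-- B inverts A's per-user decomposition into a gather (reporters per target) / scatter (+1 per banned target's reporter) pair of passes; equal cost, different structure.

-- ===== PORT A =====
def solution (id_list : List String) (report : List String) (k : Int) : List Int :=
  -- answer = []; reported_users = dict(); users = dict(); for id in id_list: … (one loop filling both dicts)
  let dicts :=
    id_list.foldl
      (fun (st : PySem.Dict String (PySem.Set String) × PySem.Dict String (PySem.Set String)) id =>
        (st.1.insert id PySem.Set.empty, st.2.insert id PySem.Set.empty))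
      (PySem.Dict.empty, PySem.Dict.empty)
  -- for r in report: uid, reported_id = r.split(); reported_users[reported_id].add(uid); users[uid].add(reported_id)
  -- (an unpacking failure or a missing key raises in Python; those inputs are outside Pre_solution — the default match arm is a totality guard only)
  let dicts2 :=
    report.foldl
      (fun (st : PySem.Dict String (PySem.Set String) × PySem.Dict String (PySem.Set String)) r =>
        match PySem.Str.split₀ r with
        | [uid, reported_id] =>
            (st.1.modify reported_id PySem.Set.empty (fun s => PySem.Set.add s uid),
             st.2.modify uid PySem.Set.empty (fun s => PySem.Set.add s reported_id))
        | _ => st)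
      dicts
  -- for repo_info in users.items(): cnt = 0; for repo_id in repo_info[1]: if len(reported_users[repo_id]) >= k: cnt += 1; answer.append(cnt)
  dicts2.2.items.foldl
    (fun (answer : List Int) repo_info =>
      answer ++ [repo_info.2.foldl
        (fun (cnt : Int) repo_id =>
          if ((PySem.Set.len (dicts2.1.getD repo_id PySem.Set.empty) : Int) ≥ k) then cnt + 1 else cnt)
        0])
    []

-- ===== PORT B =====
def solution_alt (id_list : List String) (report : List String) (k : Int) : List Int :=
  -- for r in report: uid, target = r.split(); reporters_of.setdefault(target, set()).add(uid)
  -- (setdefault-then-add is Dict.modify with default empty set; unpacking failure raises in Python — outside Pre_solution)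
  let reporters_of :=
    report.foldl
      (fun (d : PySem.Dict String (PySem.Set String)) r =>
        match PySem.Str.split₀ r with
        | [uid, target] => d.modify target PySem.Set.empty (fun s => PySem.Set.add s uid)
        | [] => d
        | [_] => d
        | _ :: _ :: _ :: _ => d)
      PySem.Dict.empty
  -- count = {uid: 0 for uid in id_list}
  let count0 := id_list.foldl (fun (d : PySem.Dict String Int) uid => d.insert uid (0 : Int)) PySem.Dict.empty
  -- for reporters in reporters_of.values(): if len(reporters) >= k: for uid in reporters: count[uid] += 1
  -- (count[uid] with uid missing raises in Python — outside Pre_solution)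
  let count :=
    reporters_of.items.foldl
      (fun (c : PySem.Dict String Int) ti =>
        if ((PySem.Set.len ti.2 : Int) ≥ k) then
          ti.2.foldl (fun (c' : PySem.Dict String Int) uid => c'.modify uid 0 (· + 1)) c
        else c)
      count0
  -- return list(count.values())  (count's keys are id_list's distinct ids in first-occurrence order)
  count.values

-- ===== PRECONDITION & SPEC =====
-- Pre_ excludes exactly the inputs on which A raises: report lines that do not split into exactly two
-- whitespace-separated tokens (ValueError on unpacking) or whose tokens are not in id_list (KeyError).
def Pre_solution (id_list : List String) (report : List String) (k : Int) : Prop :=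
  ∀ r ∈ report, (PySem.Str.split₀ r).length = 2 ∧ ∀ t ∈ PySem.Str.split₀ r, t ∈ id_list
instance (id_list : List String) (report : List String) (k : Int) : Decidable (Pre_solution id_list report k) := by unfold Pre_solution; infer_instance

def pvWitness_solution : List String × List String × Int :=
  (["muzi", "frodo", "apeach", "neo"],
   ["muzi frodo", "apeach frodo", "frodo neo", "muzi neo", "apeach muzi"], 2)

def Spec_solution (id_list : List String) (report : List String) (k : Int) (out : List Int) : Prop := out = solution_alt id_list report k
instance (id_list : List String) (report : List String) (k : Int) (out : List Int) : Decidable (Spec_solution id_list report k out) := by unfold Spec_solution; infer_instance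

-- ===== CLAIM (what is proved, stated in full; the proofs are below) =====
def Claim_equal_solution : Prop := ∀ (id_list : List String) (report : List String) (k : Int), Dom_solution id_list report k → Pre_solution id_list report k → Spec_solution id_list report k (solution id_list report k)

-- ===== LEMMAS AND PROOFS =====

-- the report-scan step updating a reporters-per-target dict (shared shape of A's reported_users update and B's reporters_of update)
def pvStepRep (d : PySem.Dict String (PySem.Set String)) (r : String) : PySem.Dict String (PySem.Set String) :=
  match PySem.Str.split₀ r with
  | [uid, target] => d.modify target PySem.Set.empty (fun s => PySem.Set.add s uid)
  | [] => d
  | [_] => d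
  | _ :: _ :: _ :: _ => d

-- the report-scan step updating A's users dict (targets per reporter)
def pvStepUse (d : PySem.Dict String (PySem.Set String)) (r : String) : PySem.Dict String (PySem.Set String) :=
  match PySem.Str.split₀ r with
  | [uid, target] => d.modify uid PySem.Set.empty (fun s => PySem.Set.add s target)
  | _ => d


lemma step_eq (st : PySem.Dict String (PySem.Set String) × PySem.Dict String (PySem.Set String)) (r : String) :
    (match PySem.Str.split₀ r with
     | [uid, reported_id] =>
         (st.1.modify reported_id PySem.Set.empty (fun s => PySem.Set.add s uid),
          st.2.modify uid PySem.Set.empty (fun s => PySem.Set.add s reported_id))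
     | _ => st)
    = (pvStepRep st.1 r, pvStepUse st.2 r) := by
  unfold pvStepRep pvStepUse
  rcases h : PySem.Str.split₀ r with _ | ⟨a, _ | ⟨b, _ | ⟨c, l⟩⟩⟩ <;> simp

lemma pairfold (rep : List String)
    (st : PySem.Dict String (PySem.Set String) × PySem.Dict String (PySem.Set String)) :
    rep.foldl
      (fun st r =>
        match PySem.Str.split₀ r with
        | [uid, reported_id] =>
            (st.1.modify reported_id PySem.Set.empty (fun s => PySem.Set.add s uid),
             st.2.modify uid PySem.Set.empty (fun s => PySem.Set.add s reported_id))
        | _ => st)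
      st
    = (rep.foldl pvStepRep st.1, rep.foldl pvStepUse st.2) := by
  induction rep generalizing st with
  | nil => rfl
  | cons r rest ih =>
    rw [List.foldl_cons, step_eq st r]
    exact ih _

lemma pairinit (idl : List String)
    (st : PySem.Dict String (PySem.Set String) × PySem.Dict String (PySem.Set String)) :
    idl.foldl
      (fun st id => (st.1.insert id PySem.Set.empty, st.2.insert id PySem.Set.empty))
      st
    = (idl.foldl (fun d id => d.insert id PySem.Set.empty) st.1,
       idl.foldl (fun d id => d.insert id PySem.Set.empty) st.2) := by
  induction idl generalizing st with
  | nil => rfl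
  | cons x xs ih => simp only [List.foldl_cons, ih]

lemma stepRep_getD_congr (rep : List String) (d e : PySem.Dict String (PySem.Set String))
    (h : ∀ x, d.getD x PySem.Set.empty = e.getD x PySem.Set.empty) :
    ∀ x, (rep.foldl pvStepRep d).getD x PySem.Set.empty = (rep.foldl pvStepRep e).getD x PySem.Set.empty := by
  induction rep generalizing d e with
  | nil => exact h
  | cons r rest ih =>
    refine ih _ _ (fun x => ?_)
    unfold pvStepRep
    rcases hr : PySem.Str.split₀ r with _ | ⟨a, _ | ⟨b, _ | ⟨c, l⟩⟩⟩ <;>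
      simp only [PySem.Dict.getD_modify] <;> try exact h x
    rw [h x, h b]

lemma init_getD_empty (idl : List String) (d : PySem.Dict String (PySem.Set String))
    (h : ∀ x, d.getD x PySem.Set.empty = PySem.Set.empty) :
    ∀ x, (idl.foldl (fun d id => d.insert id PySem.Set.empty) d).getD x PySem.Set.empty = PySem.Set.empty := by
  induction idl generalizing d with
  | nil => exact h
  | cons y ys ih =>
    refine ih _ (fun x => ?_)
    show (d.insert y PySem.Set.empty).getD x PySem.Set.empty = PySem.Set.empty
    rw [PySem.Dict.getD_insert]
    split
    · rfl
    · exact h x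

lemma duality (rep : List String) (US RO : PySem.Dict String (PySem.Set String))
    (h : ∀ id t, t ∈ US.getD id PySem.Set.empty ↔ id ∈ RO.getD t PySem.Set.empty) :
    ∀ id t, t ∈ (rep.foldl pvStepUse US).getD id PySem.Set.empty ↔
            id ∈ (rep.foldl pvStepRep RO).getD t PySem.Set.empty := by
  induction rep generalizing US RO with
  | nil => exact h
  | cons r rest ih =>
    refine ih _ _ (fun id t => ?_)
    unfold pvStepRep pvStepUse
    rcases hr : PySem.Str.split₀ r with _ | ⟨a, _ | ⟨b, _ | ⟨c, l⟩⟩⟩ <;>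
      simp only [PySem.Dict.getD_modify] <;> try exact h id t
    by_cases hid : id = a <;> by_cases ht : t = b
    · subst hid; subst ht; simp [PySem.Set.mem_add]
    · subst hid
      simp [ht, PySem.Set.mem_add]
      exact h id t
    · subst ht
      simp [hid, PySem.Set.mem_add]
      exact h id t
    · simp [hid, ht]
      exact h id t

lemma nodup_vals_rep (rep : List String) (d : PySem.Dict String (PySem.Set String))
    (h : ∀ x, (d.getD x PySem.Set.empty).Nodup) :
    ∀ x, ((rep.foldl pvStepRep d).getD x PySem.Set.empty).Nodup := by
  induction rep generalizing d with
  | nil => exact h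
  | cons r rest ih =>
    refine ih _ (fun x => ?_)
    unfold pvStepRep
    rcases hr : PySem.Str.split₀ r with _ | ⟨a, _ | ⟨b, _ | ⟨c, l⟩⟩⟩ <;>
      try exact h x
    rw [PySem.Dict.getD_modify]
    split
    · exact PySem.Set.nodup_add _ _ (h b)
    · exact h x

lemma nodup_vals_use (rep : List String) (d : PySem.Dict String (PySem.Set String))
    (h : ∀ x, (d.getD x PySem.Set.empty).Nodup) :
    ∀ x, ((rep.foldl pvStepUse d).getD x PySem.Set.empty).Nodup := by
  induction rep generalizing d with
  | nil => exact h
  | cons r rest ih =>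
    refine ih _ (fun x => ?_)
    unfold pvStepUse
    rcases hr : PySem.Str.split₀ r with _ | ⟨a, _ | ⟨b, _ | ⟨c, l⟩⟩⟩ <;>
      try exact h x
    rw [PySem.Dict.getD_modify]
    split
    · exact PySem.Set.nodup_add _ _ (h a)
    · exact h x

lemma keys_use (idl rep : List String) (d : PySem.Dict String (PySem.Set String))
    (hrep : ∀ r ∈ rep, (PySem.Str.split₀ r).length = 2 ∧ ∀ t ∈ PySem.Str.split₀ r, t ∈ idl)
    (h : ∀ x ∈ idl, x ∈ d.keys) :
    (rep.foldl pvStepUse d).keys = d.keys := by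
  induction rep generalizing d with
  | nil => rfl
  | cons r rest ih =>
    have hr := hrep r (List.mem_cons_self ..)
    have hstep : (pvStepUse d r).keys = d.keys := by
      unfold pvStepUse
      rcases hsp : PySem.Str.split₀ r with _ | ⟨a, _ | ⟨b, _ | ⟨c, l⟩⟩⟩ <;>
        first | rfl | simp [hsp] at hr
      rw [PySem.Dict.keys_modify, PySem.Dict.keys_insert_of_contains]
      exact (PySem.Dict.contains_iff_mem_keys d a).mpr (h a hr.1)
    rw [List.foldl_cons,
      ih _ (fun r' hr' => hrep r' (List.mem_cons_of_mem _ hr'))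
        (fun x hx => by rw [hstep]; exact h x hx), hstep]

-- every reporter stored in the gather dict is one of the known ids
lemma vals_sub_rep (idl rep : List String) (d : PySem.Dict String (PySem.Set String))
    (hrep : ∀ r ∈ rep, (PySem.Str.split₀ r).length = 2 ∧ ∀ t ∈ PySem.Str.split₀ r, t ∈ idl)
    (h : ∀ x, ∀ u ∈ d.getD x PySem.Set.empty, u ∈ idl) :
    ∀ x, ∀ u ∈ (rep.foldl pvStepRep d).getD x PySem.Set.empty, u ∈ idl := by
  induction rep generalizing d with
  | nil => exact h
  | cons r rest ih =>
    have hr := hrep r (List.mem_cons_self ..)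
    refine ih _ (fun r' hr' => hrep r' (List.mem_cons_of_mem _ hr')) (fun x u hu => ?_)
    revert hu
    unfold pvStepRep
    rcases hsp : PySem.Str.split₀ r with _ | ⟨a, _ | ⟨b, _ | ⟨c, l⟩⟩⟩ <;>
      first | exact h x u | simp [hsp] at hr
    rw [PySem.Dict.getD_modify]
    split
    · intro hu
      rcases (PySem.Set.mem_add _ _ _).mp hu with h1 | h1
      · exact h b u h1
      · exact h1 ▸ hr.1
    · exact h x u

-- the scatter loop only touches existing keys
lemma keys_scatter_inner (s : List String) (c : PySem.Dict String Int)
    (h : ∀ u ∈ s, u ∈ c.keys) :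
    (s.foldl (fun c' uid => c'.modify uid 0 (· + 1)) c).keys = c.keys := by
  induction s generalizing c with
  | nil => rfl
  | cons u us ih =>
    have hstep : (c.modify u 0 (· + 1)).keys = c.keys := by
      rw [PySem.Dict.keys_modify, PySem.Dict.keys_insert_of_contains]
      exact (PySem.Dict.contains_iff_mem_keys c u).mpr (h u (List.mem_cons_self ..))
    rw [List.foldl_cons,
      ih _ (fun x hx => hstep ▸ h x (List.mem_cons_of_mem _ hx)), hstep]

lemma keys_scatter (k : Int) (L : List (String × PySem.Set String)) (c : PySem.Dict String Int)
    (h : ∀ ti ∈ L, ∀ u ∈ (ti.2 : List String), u ∈ c.keys) :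
    (L.foldl
      (fun (c : PySem.Dict String Int) ti =>
        if ((PySem.Set.len ti.2 : Int) ≥ k) then
          ti.2.foldl (fun c' uid => c'.modify uid 0 (· + 1)) c
        else c)
      c).keys = c.keys := by
  induction L generalizing c with
  | nil => rfl
  | cons ti rest ih =>
    have hstep :
        ((if ((PySem.Set.len ti.2 : Int) ≥ k) then
            ti.2.foldl (fun c' uid => c'.modify uid 0 (· + 1)) c
          else c) : PySem.Dict String Int).keys = c.keys := by
      split
      · exact keys_scatter_inner _ _ (h ti (List.mem_cons_self ..))
      · rfl
    rw [List.foldl_cons,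
      ih _ (fun ti' ht' u hu => hstep ▸ h ti' (List.mem_cons_of_mem _ ht') u hu), hstep]

lemma count0_getD (idl : List String) (d : PySem.Dict String Int)
    (h : ∀ x, d.getD x 0 = 0) :
    ∀ x, (idl.foldl (fun d uid => d.insert uid (0 : Int)) d).getD x 0 = 0 := by
  induction idl generalizing d with
  | nil => exact h
  | cons y ys ih =>
    refine ih _ (fun x => ?_)
    show (d.insert y 0).getD x 0 = 0
    rw [PySem.Dict.getD_insert]
    split
    · rfl
    · exact h x

lemma scatter (k : Int) (L : List (String × PySem.Set String)) (c : PySem.Dict String Int) (id : String) :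
    (L.foldl
      (fun (c : PySem.Dict String Int) ti =>
        if ((PySem.Set.len ti.2 : Int) ≥ k) then
          ti.2.foldl (fun c' uid => c'.modify uid 0 (· + 1)) c
        else c)
      c).getD id 0
    = c.getD id 0 + (L.map (fun ti => if ((PySem.Set.len ti.2 : Int) ≥ k) then (ti.2.count id : Int) else 0)).sum := by
  induction L generalizing c with
  | nil => simp
  | cons ti rest ih =>
    rw [List.foldl_cons, ih, List.map_cons, List.sum_cons]
    split
    · rw [PySem.Dict.getD_foldl_modify_add_one]
      ring
    · ring

lemma nodup_keys_rep (rep : List String) (d : PySem.Dict String (PySem.Set String))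
    (h : d.keys.Nodup) : (rep.foldl pvStepRep d).keys.Nodup := by
  induction rep generalizing d with
  | nil => exact h
  | cons r rest ih =>
    refine ih _ ?_
    unfold pvStepRep
    rcases hr : PySem.Str.split₀ r with _ | ⟨a, _ | ⟨b, _ | ⟨c, l⟩⟩⟩ <;> try exact h
    rw [PySem.Dict.keys_modify]
    have := PySem.Dict.nodup_keys_insert d b ((d.getD b PySem.Set.empty).add a) h
    exact this

lemma per_id (k : Int) (S : List String) (RO : PySem.Dict String (PySem.Set String)) (id : String)
    (hS : S.Nodup) (hkeys : RO.keys.Nodup)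
    (hvals : ∀ t, (RO.getD t PySem.Set.empty).Nodup)
    (hdual : ∀ t, t ∈ S ↔ id ∈ RO.getD t PySem.Set.empty) :
    (S.countP (fun t => decide ((PySem.Set.len (RO.getD t PySem.Set.empty) : Int) ≥ k)) : Int)
    = (RO.items.map (fun ti => if ((PySem.Set.len ti.2 : Int) ≥ k) then (ti.2.count id : Int) else 0)).sum := by
  rw [PySem.Dict.items_eq_map_keys RO hkeys PySem.Set.empty, List.map_map]
  have h1 : ∀ t ∈ RO.keys,
      ((fun ti => if ((PySem.Set.len ti.2 : Int) ≥ k) then ((ti.2 : PySem.Set String).count id : Int) else 0) ∘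
        (fun t => (t, RO.getD t PySem.Set.empty))) t
      = (fun t => if ((decide ((PySem.Set.len (RO.getD t PySem.Set.empty) : Int) ≥ k) &&
            decide (id ∈ RO.getD t PySem.Set.empty)) : Bool) then (1 : Int) else 0) t := by
    intro t ht
    simp only [Function.comp]
    rw [List.Nodup.count (hvals t)]
    simp only [Bool.and_eq_true, decide_eq_true_eq]
    split_ifs with h1 h2 h3 <;> first | rfl | tauto
  rw [List.map_congr_left h1]
  rw [PySem.List.sum_map_ite_one_zero
    (fun t => (decide ((PySem.Set.len (RO.getD t PySem.Set.empty) : Int) ≥ k) &&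
            decide (id ∈ RO.getD t PySem.Set.empty)))]
  congr 1
  -- countP S p = countP keys q
  rw [List.countP_eq_length_filter, List.countP_eq_length_filter]
  refine List.Perm.length_eq ?_
  refine (List.perm_ext_iff_of_nodup (List.Nodup.filter _ hS) (List.Nodup.filter _ hkeys)).mpr ?_
  intro t
  simp only [List.mem_filter, Bool.and_eq_true, decide_eq_true_eq]
  constructor
  · rintro ⟨htS, hp⟩
    have hm : id ∈ RO.getD t PySem.Set.empty := (hdual t).mp htS
    have hk : t ∈ RO.keys := by
      by_contra hk
      have hc : RO.contains t = false := by
        cases hcc : RO.contains t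
        · rfl
        · exact absurd ((PySem.Dict.contains_iff_mem_keys RO t).mp hcc) hk
      rw [PySem.Dict.getD_of_not_contains RO PySem.Set.empty hc] at hm
      simp [PySem.Set.empty] at hm
    exact ⟨hk, hp, hm⟩
  · rintro ⟨hk, hp, hm⟩
    exact ⟨(hdual t).mpr hm, hp⟩


-- ===== VERDICT (by name: the statement is the Claim_ definition above) =====
theorem solution_spec : Claim_equal_solution := by
  unfold Claim_equal_solution
  intro idl rep k hdom hpre
  unfold Spec_solution solution solution_alt
  simp only [pairinit, pairfold, PySem.List.foldl_append_singleton_eq_map, List.nil_append,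
    PySem.List.foldl_ite_add_one, zero_add]
  rw [show (fun (d : PySem.Dict String (PySem.Set String)) (r : String) =>
        match PySem.Str.split₀ r with
        | [uid, target] => d.modify target PySem.Set.empty (fun s => PySem.Set.add s uid)
        | [] => d
        | [_] => d
        | _ :: _ :: _ :: _ => d) = pvStepRep from rfl]
  set I := idl.foldl (fun d id => d.insert id PySem.Set.empty)
      (PySem.Dict.empty : PySem.Dict String (PySem.Set String)) with hI
  set RU := rep.foldl pvStepRep I with hRU
  set US := rep.foldl pvStepUse I with hUS
  set RO := rep.foldl pvStepRep (PySem.Dict.empty : PySem.Dict String (PySem.Set String)) with hRO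
  set C0 := idl.foldl (fun d uid => d.insert uid (0 : Int))
      (PySem.Dict.empty : PySem.Dict String Int) with hC0
  have hIempty : ∀ x, I.getD x PySem.Set.empty = PySem.Set.empty :=
    init_getD_empty idl PySem.Dict.empty (fun y => PySem.Dict.getD_empty y PySem.Set.empty)
  have hkeysI : I.keys = PySem.Set.ofList idl := by
    rw [hI, PySem.Dict.keys_foldl_insert, PySem.Dict.keys_empty, PySem.Set.update_nil_left]
  have hkeysUS : US.keys = PySem.Set.ofList idl := by
    rw [hUS, keys_use idl rep I hpre
      (fun x hx => by rw [hkeysI]; exact (PySem.Set.mem_ofList idl x).mpr hx), hkeysI]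
  have hndUS : US.keys.Nodup := by rw [hkeysUS]; exact PySem.Set.nodup_ofList idl
  rw [PySem.Dict.items_eq_map_keys US hndUS PySem.Set.empty, hkeysUS, List.map_map]
  -- B side: values of the count dict, whose keys are the distinct ids in order
  have hC0keys : C0.keys = PySem.Set.ofList idl := by
    rw [hC0, PySem.Dict.keys_foldl_insert, PySem.Dict.keys_empty, PySem.Set.update_nil_left]
  have hndRO : RO.keys.Nodup :=
    nodup_keys_rep rep PySem.Dict.empty (by rw [PySem.Dict.keys_empty]; exact List.nodup_nil)
  have hROvals : ∀ x, ∀ u ∈ RO.getD x PySem.Set.empty, u ∈ idl :=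
    vals_sub_rep idl rep PySem.Dict.empty hpre
      (fun x u hu => by rw [PySem.Dict.getD_empty] at hu; exact absurd hu (List.not_mem_nil))
  have hCkeys :
      (RO.items.foldl
        (fun (c : PySem.Dict String Int) ti =>
          if ((PySem.Set.len ti.2 : Int) ≥ k) then
            ti.2.foldl (fun c' uid => c'.modify uid 0 (· + 1)) c
          else c)
        C0).keys = PySem.Set.ofList idl := by
    refine Eq.trans (keys_scatter k RO.items C0 ?_) hC0keys
    rintro ⟨a, s2⟩ hti u hu
    have hval : RO.getD a PySem.Set.empty = s2 :=
      PySem.Dict.getD_of_mem_items RO hti hndRO PySem.Set.empty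
    rw [hC0keys]
    exact (PySem.Set.mem_ofList idl u).mpr (hROvals a u (hval ▸ hu))
  have hndC :
      (RO.items.foldl
        (fun (c : PySem.Dict String Int) ti =>
          if ((PySem.Set.len ti.2 : Int) ≥ k) then
            ti.2.foldl (fun c' uid => c'.modify uid 0 (· + 1)) c
          else c)
        C0).keys.Nodup := by rw [hCkeys]; exact PySem.Set.nodup_ofList idl
  rw [PySem.Dict.values_eq_map_keys _ hndC 0, hCkeys]
  refine List.map_congr_left ?_
  intro id hid
  simp only [Function.comp]
  rw [scatter k RO.items C0 id,
    count0_getD idl PySem.Dict.empty (fun x => PySem.Dict.getD_empty x 0) id, zero_add]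
  have hRURO : ∀ x, RU.getD x PySem.Set.empty = RO.getD x PySem.Set.empty := by
    refine stepRep_getD_congr rep I PySem.Dict.empty (fun x => ?_)
    rw [hIempty x, PySem.Dict.getD_empty]
  have hpred : (fun t => decide ((PySem.Set.len (RU.getD t PySem.Set.empty) : Int) ≥ k))
      = (fun t => decide ((PySem.Set.len (RO.getD t PySem.Set.empty) : Int) ≥ k)) :=
    funext fun t => by rw [hRURO t]
  rw [hpred]
  refine per_id k (US.getD id PySem.Set.empty) RO id ?_ ?_ ?_ ?_
  · exact nodup_vals_use rep I (fun x => by rw [hIempty x]; exact List.nodup_nil) id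
  · exact hndRO
  · exact nodup_vals_rep rep PySem.Dict.empty
      (fun x => by rw [PySem.Dict.getD_empty]; exact List.nodup_nil)
  · intro t
    refine duality rep I PySem.Dict.empty (fun id' t' => ?_) id t
    rw [hIempty id', PySem.Dict.getD_empty]
    simp [PySem.Set.empty]
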